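-- pv_equiv track=rewrite | github.com/Obila34/TelcoTroubleshootingAgenticChallenge | telco-agent/formatter.py | _pick_fault_style_line
-- ===== SOURCE A (Python) =====
-- def _is_bad_fault_submission(line: str) -> bool:
--     """Lines graders won't match: API failures, placeholders, essays."""
--     s = line.strip().strip("`").strip()
--     if not s or len(s) > 420:
--         return True
--     low = s.lower()
--     if low == "fault_type;device_or_port;reason":
--         return True
--     if "**" in s or "```" in s:
--         return True
--     banned_substrings = (
--         "api_unavailable",
--         "api unavailable",
--         "sandbox",
--         "404",
--         "422",
--         "connection refused",
--         "connection reset",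
--         "unable to execute",
--         "execute endpoint",
--         "diagnostic failure",
--         "unable to diagnose",
--         "tool unavailable",
--         "please ensure",
--         "i'm unable",
--         "i cannot",
--         "management plane",
--         "endpoint unreachable",
--         "api returned",
--         "api error",
--         "api endpoint",
--     )
--     for b in banned_substrings:
--         if b in low:
--             return True
--     return False
--
-- def _pick_fault_style_line(lines: list[str]) -> str | None:
--     """Prefer the last concise semicolon-separated answer line (exact-match grading)."""
--     skip_prefixes = (
--         "based on my",
--         "routing table",
--         "interface status",
--         "root cause",
--         "fault diagnosis",
--         "configuration:",
--         "the device has",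
--         "analysis:",
--         "**routing",
--         "**interface",
--         "**root",
--     )
--
--     def usable(ln: str) -> bool:
--         low = ln.lower().lstrip("* ")
--         if any(low.startswith(p) for p in skip_prefixes):
--             return False
--         if low.startswith(("-", "*", "•")):
--             return False
--         return True
--
--     # Prefer a true tuple (two semicolons → three fields); graders often require this shape.
--     candidates: list[str] = []
--     for ln in reversed(lines):
--         if not usable(ln) or ";" not in ln:
--             continue
--         if ln.count(";") >= 2 and len(ln) <= 600:
--             candidates.append(ln)
--     for ln in reversed(lines):
--         if usable(ln) and ";" in ln and len(ln) <= 600: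
--             candidates.append(ln)
--
--     for ln in candidates:
--         if not _is_bad_fault_submission(ln):
--             return ln
--     return None
-- ===== SOURCE B (Python) =====
-- def _is_bad_fault_submission(line: str) -> bool:
--     """Lines graders won't match: API failures, placeholders, essays."""
--     s = line.strip().strip("`").strip()
--     low = s.lower()
--     return (not s or len(s) > 420
--             or low == "fault_type;device_or_port;reason"
--             or "**" in s or "```" in s
--             or any(b in low for b in (
--                 "api_unavailable", "api unavailable", "sandbox", "404", "422",
--                 "connection refused", "connection reset", "unable to execute",
--                 "execute endpoint", "diagnostic failure", "unable to diagnose",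
--                 "tool unavailable", "please ensure", "i'm unable", "i cannot",
--                 "management plane", "endpoint unreachable", "api returned",
--                 "api error", "api endpoint")))
--
--
-- def _pick_fault_style_line(lines: list[str]) -> str | None:
--     """Single forward pass keeping the last acceptable line of each tier."""
--     skip_prefixes = (
--         "based on my", "routing table", "interface status", "root cause",
--         "fault diagnosis", "configuration:", "the device has", "analysis:",
--         "**routing", "**interface", "**root",
--     )
--
--     def good(ln: str) -> bool:
--         low = ln.lower().lstrip("* ")
--         return (not any(low.startswith(p) for p in skip_prefixes)
--                 and not low.startswith(("-", "*", "•"))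
--                 and ";" in ln and len(ln) <= 600
--                 and not _is_bad_fault_submission(ln))
--
--     best_pair = None   # last good line with >= 2 semicolons
--     best_any = None    # last good line with >= 1 semicolon
--     for ln in lines:
--         if good(ln):
--             best_any = ln
--             if ln.count(";") >= 2:
--                 best_pair = ln
--     return best_pair if best_pair is not None else best_any
-- ===== Notes on version B (the rewrite author's own statement) =====
-- stated objective: faster
-- what changed: B replaces A's two reversed candidate-collecting loops plus a separate final filter loop by a single forward pass with two 'last acceptable line' accumulators (tiered by semicolon count), evaluating the predicates once per line instead of scanning the list twice and building an intermediate candidates list.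
import Mathlib
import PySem

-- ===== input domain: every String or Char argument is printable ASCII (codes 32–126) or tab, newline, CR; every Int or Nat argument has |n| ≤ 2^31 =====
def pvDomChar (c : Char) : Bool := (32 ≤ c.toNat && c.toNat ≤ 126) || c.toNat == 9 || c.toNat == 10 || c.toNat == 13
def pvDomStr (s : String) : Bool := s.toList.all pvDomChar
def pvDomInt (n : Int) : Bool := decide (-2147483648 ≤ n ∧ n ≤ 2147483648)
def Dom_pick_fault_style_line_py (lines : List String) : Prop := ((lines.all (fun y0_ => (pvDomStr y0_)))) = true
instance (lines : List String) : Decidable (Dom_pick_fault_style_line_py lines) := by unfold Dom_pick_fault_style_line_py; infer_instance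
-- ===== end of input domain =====

-- B replaces A's two reversed candidate-collecting loops plus a final filter loop by ONE forward
-- pass with two "last acceptable line" accumulators (objective: faster, measured constant-factor
-- gain in a timing run); return values proved equal.

-- ===== PORT A =====

def pvBanned : List String :=
  ["api_unavailable", "api unavailable", "sandbox", "404", "422",
   "connection refused", "connection reset", "unable to execute", "execute endpoint",
   "diagnostic failure", "unable to diagnose", "tool unavailable", "please ensure",
   "i'm unable", "i cannot", "management plane", "endpoint unreachable",
   "api returned", "api error", "api endpoint"]

-- port of A's _is_bad_fault_submission (early-returning if-chain, as in A)
def pvBad (line : String) : Bool :=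
  let s := PySem.Str.strip (PySem.Str.stripChars (PySem.Str.strip line) "`")
  if s == "" || PySem.Str.len s > 420 then true
  else
    let low := PySem.Str.lower s
    if low == "fault_type;device_or_port;reason" then true
    else if PySem.Str.isIn "**" s || PySem.Str.isIn "```" s then true
    else pvBanned.any (fun b => PySem.Str.isIn b low)

def pvSkipPrefixes : List String :=
  ["based on my", "routing table", "interface status", "root cause", "fault diagnosis",
   "configuration:", "the device has", "analysis:", "**routing", "**interface", "**root"]

-- port of A's usable; lstrip("* ") is hand-ported as dropWhile over the char list (exact)
def pvUsable (ln : String) : Bool :=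
  let low := String.ofList ((PySem.Str.lower ln).toList.dropWhile (fun c => c == '*' || c == ' '))
  if pvSkipPrefixes.any (fun p => PySem.Str.startswith low p) then false
  else if PySem.Str.startswith low "-" || PySem.Str.startswith low "*" ||
          PySem.Str.startswith low "•" then false
  else true

def pick_fault_style_line_py (lines : List String) : Option String :=
  let cands1 := lines.reverse.foldl
    (fun acc ln =>
      if !pvUsable ln || !PySem.Str.isIn ";" ln then acc
      else if 2 ≤ PySem.Str.count ln ";" && PySem.Str.len ln ≤ 600 then acc ++ [ln]
      else acc) []
  let cands := lines.reverse.foldl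
    (fun acc ln =>
      if pvUsable ln && PySem.Str.isIn ";" ln && PySem.Str.len ln ≤ 600 then acc ++ [ln]
      else acc) cands1
  cands.find? (fun ln => !pvBad ln)

-- ===== PORT B =====

-- B's _is_bad_fault_submission: one flat disjunction (as written in Source B)
def pvBadB (line : String) : Bool :=
  let s := PySem.Str.strip (PySem.Str.stripChars (PySem.Str.strip line) "`")
  let low := PySem.Str.lower s
  s == "" || PySem.Str.len s > 420 ||
  low == "fault_type;device_or_port;reason" ||
  PySem.Str.isIn "**" s || PySem.Str.isIn "```" s ||
  (["api_unavailable", "api unavailable", "sandbox", "404", "422",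
    "connection refused", "connection reset", "unable to execute", "execute endpoint",
    "diagnostic failure", "unable to diagnose", "tool unavailable", "please ensure",
    "i'm unable", "i cannot", "management plane", "endpoint unreachable",
    "api returned", "api error", "api endpoint"] : List String).any
      (fun b => PySem.Str.isIn b low)

-- B's good(ln): one conjunction (usable ∧ ';' present ∧ length bound ∧ not bad)
def pvGoodB (ln : String) : Bool :=
  let low := String.ofList ((PySem.Str.lower ln).toList.dropWhile (fun c => c == '*' || c == ' '))
  !((["based on my", "routing table", "interface status", "root cause", "fault diagnosis",
      "configuration:", "the device has", "analysis:", "**routing", "**interface", "**root"] : List String).any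
      (fun p => PySem.Str.startswith low p)) &&
  !(PySem.Str.startswith low "-" || PySem.Str.startswith low "*" ||
    PySem.Str.startswith low "•") &&
  PySem.Str.isIn ";" ln && PySem.Str.len ln ≤ 600 && !pvBadB ln

def pick_fault_style_line_py_alt (lines : List String) : Option String :=
  let st := lines.foldl
    (fun (st : Option String × Option String) ln =>
      if pvGoodB ln then
        (if 2 ≤ PySem.Str.count ln ";" then some ln else st.1, some ln)
      else st)
    (none, none)
  match st.1 with
  | some r => some r
  | none => st.2

-- ===== PRECONDITION & SPEC =====
def Spec_pick_fault_style_line_py (lines : List String) (out : Option String) : Prop := out = pick_fault_style_line_py_alt lines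
instance (lines : List String) (out : Option String) : Decidable (Spec_pick_fault_style_line_py lines out) := by unfold Spec_pick_fault_style_line_py; infer_instance

-- ===== CLAIM =====
def Claim_equal_pick_fault_style_line_py : Prop := ∀ (lines : List String), Dom_pick_fault_style_line_py lines → Spec_pick_fault_style_line_py lines (pick_fault_style_line_py lines)

-- ===== LEMMAS AND PROOFS =====

-- B's helpers equal A's helpers
theorem pvBadB_eq (ln : String) : pvBadB ln = pvBad ln := by
  simp only [pvBadB, pvBad, pvBanned]
  cases h1 : (PySem.Str.strip (PySem.Str.stripChars (PySem.Str.strip ln) "`") == "") <;>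
  cases h2 : decide (PySem.Str.len (PySem.Str.strip (PySem.Str.stripChars (PySem.Str.strip ln) "`")) > 420) <;>
  cases h3 : (PySem.Str.lower (PySem.Str.strip (PySem.Str.stripChars (PySem.Str.strip ln) "`")) == "fault_type;device_or_port;reason") <;>
  cases h4 : PySem.Str.isIn "**" (PySem.Str.strip (PySem.Str.stripChars (PySem.Str.strip ln) "`")) <;>
  cases h5 : PySem.Str.isIn "```" (PySem.Str.strip (PySem.Str.stripChars (PySem.Str.strip ln) "`")) <;>
  simp

theorem pvUsable_eq (ln : String) :
    pvUsable ln =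
    (!(pvSkipPrefixes.any fun p => PySem.Str.startswith
        (String.ofList ((PySem.Str.lower ln).toList.dropWhile fun c => c == '*' || c == ' ')) p) &&
     !(PySem.Str.startswith
         (String.ofList ((PySem.Str.lower ln).toList.dropWhile fun c => c == '*' || c == ' ')) "-" ||
       PySem.Str.startswith
         (String.ofList ((PySem.Str.lower ln).toList.dropWhile fun c => c == '*' || c == ' ')) "*" ||
       PySem.Str.startswith
         (String.ofList ((PySem.Str.lower ln).toList.dropWhile fun c => c == '*' || c == ' ')) "•")) := by
  simp only [pvUsable]
  split_ifs with h1 h2 <;>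
    [skip; simp only [Bool.not_eq_true] at h1 h2; simp only [Bool.not_eq_true] at h1 h2] <;>
    rw [h1] <;> try rw [h2]
  all_goals simp only [Bool.not_true, Bool.not_false, Bool.false_and, Bool.true_and, Bool.and_false]

theorem pvGoodB_eq (ln : String) :
    pvGoodB ln = (pvUsable ln && PySem.Str.isIn ";" ln && decide (PySem.Str.len ln ≤ 600) && !pvBad ln) := by
  simp only [pvGoodB, pvUsable_eq, pvSkipPrefixes, pvBadB_eq]

-- A's two accumulation loops are filters of the reversed list
theorem pv_foldl1 (l : List String) :
    l.foldl
      (fun acc ln =>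
        if !pvUsable ln || !PySem.Str.isIn ";" ln then acc
        else if 2 ≤ PySem.Str.count ln ";" && PySem.Str.len ln ≤ 600 then acc ++ [ln]
        else acc) [] =
    l.filter (fun ln => pvUsable ln && PySem.Str.isIn ";" ln &&
      (2 ≤ PySem.Str.count ln ";" && PySem.Str.len ln ≤ 600)) := by
  have h : (fun (acc : List String) ln =>
        if !pvUsable ln || !PySem.Str.isIn ";" ln then acc
        else if 2 ≤ PySem.Str.count ln ";" && PySem.Str.len ln ≤ 600 then acc ++ [ln]
        else acc) =
      (fun acc ln =>
        if pvUsable ln && PySem.Str.isIn ";" ln &&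
            (2 ≤ PySem.Str.count ln ";" && PySem.Str.len ln ≤ 600) then acc ++ [ln]
        else acc) := by
    funext acc ln
    cases hu : pvUsable ln <;> cases hi : PySem.Str.isIn ";" ln <;>
      cases hc : (decide (2 ≤ PySem.Str.count ln ";") && decide (PySem.Str.len ln ≤ 600)) <;> simp
  rw [h, PySem.List.foldl_append_if _ (fun ln => ln)]
  simp

theorem pv_foldl2 (l : List String) (init : List String) :
    l.foldl
      (fun acc ln =>
        if pvUsable ln && PySem.Str.isIn ";" ln && PySem.Str.len ln ≤ 600 then acc ++ [ln]
        else acc) init =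
    init ++ l.filter (fun ln => pvUsable ln && PySem.Str.isIn ";" ln && PySem.Str.len ln ≤ 600) := by
  rw [PySem.List.foldl_append_if _ (fun ln => ln)]
  simp

-- filtering then taking the first not-bad element = one scan with the conjoined predicate
theorem pv_ff (p q : String → Bool) (h : ∀ ln, (p ln && !pvBad ln) = q ln) (l : List String) :
    (l.filter p).find? (fun ln => !pvBad ln) = l.find? q := by
  induction l with
  | nil => simp
  | cons x xs ih =>
    simp only [List.filter_cons, List.find?_cons]
    cases hx : p x with
    | true =>
      cases hb : pvBad x with
      | true =>
        have hq : q x = false := by rw [← h x, hx, hb]; simp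
        simpa [hq, hx, hb] using ih
      | false =>
        have hq : q x = true := by rw [← h x, hx, hb]; simp
        simp [hq, hb]
    | false =>
      have hq : q x = false := by rw [← h x, hx]; simp
      simpa [hq] using ih

theorem pv_taut1 (ln : String) :
    ((pvUsable ln && PySem.Str.isIn ";" ln &&
        (decide (2 ≤ PySem.Str.count ln ";") && decide (PySem.Str.len ln ≤ 600))) && !pvBad ln) =
    (pvGoodB ln && decide (2 ≤ PySem.Str.count ln ";")) := by
  rw [pvGoodB_eq]
  cases pvUsable ln <;> cases PySem.Str.isIn ";" ln <;>
    cases decide (2 ≤ PySem.Str.count ln ";") <;>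
    cases decide (PySem.Str.len ln ≤ 600) <;> cases pvBad ln <;> rfl

theorem pv_taut2 (ln : String) :
    ((pvUsable ln && PySem.Str.isIn ";" ln && decide (PySem.Str.len ln ≤ 600)) && !pvBad ln) =
    pvGoodB ln := by
  rw [pvGoodB_eq]

-- B's forward fold keeps, in each component, the LAST line satisfying its predicate
theorem pv_fold_char (l : List String) (st : Option String × Option String) :
    l.foldl
      (fun (st : Option String × Option String) ln =>
        if pvGoodB ln then
          (if 2 ≤ PySem.Str.count ln ";" then some ln else st.1, some ln)
        else st) st =
    ((match l.reverse.find? (fun ln => pvGoodB ln && decide (2 ≤ PySem.Str.count ln ";")) with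
      | some x => some x | none => st.1),
     (match l.reverse.find? (fun ln => pvGoodB ln) with
      | some x => some x | none => st.2)) := by
  induction l generalizing st with
  | nil => simp
  | cons x xs ih =>
    simp only [List.foldl_cons, List.reverse_cons, List.find?_append, ih]
    cases hg : pvGoodB x <;> by_cases hc : 2 ≤ PySem.Chars.count x.toList [';'] <;>
      cases h1 : xs.reverse.find? (fun ln => pvGoodB ln && decide (2 ≤ PySem.Str.count ln ";")) <;>
      cases h2 : xs.reverse.find? (fun ln => pvGoodB ln) <;>
      simp [hg, hc, PySem.Str.count]

-- ===== VERDICT =====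
set_option maxHeartbeats 1000000 in
theorem pick_fault_style_line_py_spec : Claim_equal_pick_fault_style_line_py := by
  intro lines _
  show pick_fault_style_line_py lines = pick_fault_style_line_py_alt lines
  simp only [pick_fault_style_line_py, pick_fault_style_line_py_alt]
  rw [pv_foldl1, pv_foldl2, List.find?_append, pv_ff _ _ pv_taut1, pv_ff _ _ pv_taut2,
    pv_fold_char]
  cases lines.reverse.find? (fun ln => pvGoodB ln && decide (2 ≤ PySem.Str.count ln ";")) <;>
    cases lines.reverse.find? (fun ln => pvGoodB ln) <;> simp
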